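-- pv_equiv track=rewrite | github.com/zhangyucs/Toolshed | filter_ads_in_m3u8/filterAdsM3u8.py | analyses
-- ===== SOURCE A (Python) =====
-- from collections import defaultdict
--
-- def analyses(data):
--     fps_dict = defaultdict(list)
--     for file, fps in data.items():
--         fps_dict[fps].append(file)
--     if fps_dict:
--         min_key = min(fps_dict, key=lambda k: len(fps_dict[k]))
--         return fps_dict[min_key]
--     else:
--         return None
-- ===== SOURCE B (Python) =====
-- from collections import Counter
--
-- def analyses(data):
--     counts = Counter(data.values())
--     if not counts:
--         return None
--     min_key = min(counts, key=lambda k: counts[k])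
--     return [file for file, fps in data.items() if fps == min_key]
-- ===== Notes on version B (the rewrite author's own statement) =====
-- stated objective: alternative
-- what changed: B never builds per-fps file lists: it counts fps occurrences with Counter(data.values()), picks the minimal-count fps, and rebuilds the winning group in a second pass over data, instead of grouping all files into a defaultdict of lists and returning the stored group.
import Mathlib
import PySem

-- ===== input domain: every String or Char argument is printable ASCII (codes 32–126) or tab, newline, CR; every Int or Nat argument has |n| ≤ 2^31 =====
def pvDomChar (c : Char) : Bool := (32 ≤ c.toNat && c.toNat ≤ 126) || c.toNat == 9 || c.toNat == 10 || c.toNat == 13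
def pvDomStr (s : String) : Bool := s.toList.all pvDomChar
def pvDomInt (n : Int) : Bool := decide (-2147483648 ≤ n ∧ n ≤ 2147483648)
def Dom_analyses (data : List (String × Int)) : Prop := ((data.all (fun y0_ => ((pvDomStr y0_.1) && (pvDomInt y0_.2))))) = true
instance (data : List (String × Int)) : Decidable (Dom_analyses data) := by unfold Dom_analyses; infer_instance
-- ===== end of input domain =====

-- B replaces A's defaultdict of per-fps file lists by integer counts (Counter of the values)
-- plus a second pass over data rebuilding the winning group; same result, proved equal.

-- ===== PORT A =====
-- A: group files by fps into a defaultdict(list); return the group of the first key with minimal group length.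
def analyses (data : List (String × Int)) : Option (List String) :=
  let items := (PySem.Dict.ofList data).items            -- data.items()
  let fpsDict := items.foldl
    (fun g p => g.modify p.2 [] (fun fs => fs ++ [p.1])) PySem.Dict.empty
  if fpsDict.size = 0 then none
  else
    match PySem.List.min? fpsDict.keys (fun k => ((fpsDict.getD k []).length : Int)) with
    | some minKey => some (fpsDict.getD minKey [])
    | none => none

-- ===== PORT B =====
-- B: counts = Counter(data.values()); min key by count; second pass filters data.items().
def analyses_alt (data : List (String × Int)) : Option (List String) :=
  let items := (PySem.Dict.ofList data).items
  let counts := PySem.Dict.counter (items.map (fun p => p.2))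
  if counts.size = 0 then none
  else
    match PySem.List.min? counts.keys (fun k => counts.getD k 0) with
    | some minKey => some ((items.filter (fun p => p.2 == minKey)).map (fun p => p.1))
    | none => none

-- ===== PRECONDITION & SPEC =====
def Spec_analyses (data : List (String × Int)) (out : Option (List String)) : Prop := out = analyses_alt data
instance (data : List (String × Int)) (out : Option (List String)) : Decidable (Spec_analyses data out) := by unfold Spec_analyses; infer_instance

-- ===== CLAIM (what is proved, stated in full; the proofs are below) =====
def Claim_equal_analyses : Prop := ∀ (data : List (String × Int)), Dom_analyses data → Spec_analyses data (analyses data)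

-- ===== LEMMAS AND PROOFS =====

-- A's grouping fold, with the pair swapped so the key is the first component.
theorem groupFold_swap (l : List (String × Int)) :
    l.foldl (fun g p => PySem.Dict.modify g p.2 [] (fun fs => fs ++ [p.1])) PySem.Dict.empty
      = (l.map Prod.swap).foldl (fun g p => PySem.Dict.modify g p.1 [] (fun fs => fs ++ [p.2])) PySem.Dict.empty := by
  rw [List.foldl_map]
  rfl

-- The stored group at key k is exactly the files of the pairs whose fps is k, in order.
theorem groupFold_getD (l : List (String × Int)) (k : Int) :
    (l.foldl (fun g p => PySem.Dict.modify g p.2 [] (fun fs => fs ++ [p.1])) PySem.Dict.empty).getD k []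
      = (l.filter (fun p => p.2 == k)).map (fun p => p.1) := by
  rw [groupFold_swap, PySem.Dict.getD_foldl_modify_append]
  simp [PySem.Dict.getD_empty, List.filter_map, List.map_map, Function.comp_def, Prod.swap]

-- Both dicts have the same key list: the distinct fps values in first-appearance order.
theorem groupFold_keys (l : List (String × Int)) :
    (l.foldl (fun g p => PySem.Dict.modify g p.2 [] (fun fs => fs ++ [p.1])) PySem.Dict.empty).keys
      = (PySem.Dict.counter (l.map (fun p => p.2))).keys := by
  rw [PySem.Dict.keys_counter,
      PySem.Dict.keys_foldl_modify_key (key := fun p : String × Int => p.2)]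
  simp [PySem.Dict.keys_empty, PySem.Set.update, PySem.Set.ofList_eq_foldl, List.foldl_map]

-- The counter's count at k equals the stored group's length.
theorem count_eq_len (l : List (String × Int)) (k : Int) :
    (PySem.Dict.counter (l.map (fun p => p.2))).getD k 0
      = (((l.filter (fun p => p.2 == k)).map (fun p => p.1)).length : Int) := by
  rw [PySem.Dict.getD_counter]
  simp [List.count_eq_countP, List.countP_map, Function.comp_def]
  exact List.countP_eq_length_filter

-- ===== VERDICT (by name: the statement is the Claim_ definition above) =====
-- The two dicts also have the same size (same key list).
theorem groupFold_size (l : List (String × Int)) :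
    (l.foldl (fun g p => PySem.Dict.modify g p.2 [] (fun fs => fs ++ [p.1])) PySem.Dict.empty).size
      = (PySem.Dict.counter (l.map (fun p => p.2))).size := by
  have h := congrArg List.length (groupFold_keys l)
  simpa [PySem.Dict.keys, PySem.Dict.size] using h

-- ===== VERDICT (by name: the statement is the Claim_ definition above) =====
theorem analyses_spec : Claim_equal_analyses := by
  intro data _
  unfold Spec_analyses analyses analyses_alt
  set l := (PySem.Dict.ofList data).items with hl
  have hfun : (fun k => (((l.foldl (fun g p => PySem.Dict.modify g p.2 [] (fun fs => fs ++ [p.1])) PySem.Dict.empty).getD k []).length : Int))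
      = fun k => (PySem.Dict.counter (l.map (fun p => p.2))).getD k 0 := by
    funext k
    rw [groupFold_getD, count_eq_len]
  simp only []
  rw [groupFold_size, groupFold_keys, hfun]
  split
  · rfl
  · split
    · rw [groupFold_getD]
    · rfl
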